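-- pv_equiv track=rewrite | github.com/Telecominfraproject/oopt-gnpy | gnpy/topology/request_all_utils.py | is_routing_node_in_path
-- ===== SOURCE A (Python) =====
-- def is_routing_node_in_path(path_nodes, routing_nodes_list):
--     """."""
--     i = 0
--     for node in routing_nodes_list:
--         if node in path_nodes:
--             if path_nodes.index(node) > i:
--                 i = path_nodes.index(node)
--             else:
--                 return False
--         else:
--             return False
--     return True
-- ===== SOURCE B (Python) =====
-- def is_routing_node_in_path(path_nodes, routing_nodes_list):
--     idxs = []
--     for node in routing_nodes_list:
--         if node not in path_nodes:
--             return False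
--         idxs.append(path_nodes.index(node))
--     return all(a < b for a, b in zip([0] + idxs, idxs))
-- ===== Notes on version B (the rewrite author's own statement) =====
-- stated objective: alternative
-- what changed: B first collects the path index of every routing node (failing fast on a missing node) and then checks strict monotonicity of the index list seeded with 0 in a separate pass, instead of A's single interleaved loop carrying a running maximum.
import Mathlib
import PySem

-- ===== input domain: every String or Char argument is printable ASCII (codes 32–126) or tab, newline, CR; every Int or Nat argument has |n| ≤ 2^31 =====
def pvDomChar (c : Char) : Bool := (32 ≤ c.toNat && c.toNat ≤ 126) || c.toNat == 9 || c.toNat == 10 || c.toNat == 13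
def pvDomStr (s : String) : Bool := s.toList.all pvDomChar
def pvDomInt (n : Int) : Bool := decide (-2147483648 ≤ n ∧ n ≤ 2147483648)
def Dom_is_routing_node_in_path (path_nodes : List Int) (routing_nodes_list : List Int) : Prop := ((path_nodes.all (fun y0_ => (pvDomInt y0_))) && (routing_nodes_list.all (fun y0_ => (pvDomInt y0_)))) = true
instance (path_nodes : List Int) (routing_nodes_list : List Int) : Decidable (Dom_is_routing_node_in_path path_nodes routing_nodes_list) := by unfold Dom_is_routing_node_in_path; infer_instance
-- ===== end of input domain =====

-- B collects each routing node's path index first and then checks strict monotonicity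
-- (seeded with 0) in a separate pass, instead of A's interleaved loop with a running maximum.

-- ===== PORT A =====
-- the loop over routing_nodes_list, carrying the running index i
def pvGoA (p : List Int) (i : Int) : List Int → Bool
  | [] => true
  | n :: rest =>
    match PySem.List.index? p n with            -- 'n in p' + 'p.index(n)' in one primitive
    | some j => if (j : Int) > i then pvGoA p (j : Int) rest else false
    | none => false

def is_routing_node_in_path (path_nodes : List Int) (routing_nodes_list : List Int) : Bool :=
  pvGoA path_nodes 0 routing_nodes_list

-- ===== PORT B =====
-- first pass: collect path_nodes.index(node) for every routing node; none = early 'return False'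
def pvCollect (p : List Int) : List Int → Option (List Nat)
  | [] => some []
  | n :: rest =>
    match PySem.List.index? p n with
    | none => none
    | some j => (pvCollect p rest).map (j :: ·)

-- second pass: all(a < b for a, b in zip(as, bs))
def pvAllLt : List Nat → List Nat → Bool
  | a :: as_, b :: bs => decide (a < b) && pvAllLt as_ bs
  | _, _ => true

def is_routing_node_in_path_alt (path_nodes : List Int) (routing_nodes_list : List Int) : Bool :=
  match pvCollect path_nodes routing_nodes_list with
  | none => false
  | some idxs => pvAllLt (0 :: idxs) idxs

-- ===== PRECONDITION & SPEC =====
def Spec_is_routing_node_in_path (path_nodes : List Int) (routing_nodes_list : List Int) (out : Bool) : Prop := out = is_routing_node_in_path_alt path_nodes routing_nodes_list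
instance (path_nodes : List Int) (routing_nodes_list : List Int) (out : Bool) : Decidable (Spec_is_routing_node_in_path path_nodes routing_nodes_list out) := by unfold Spec_is_routing_node_in_path; infer_instance

-- ===== CLAIM =====
def Claim_equal_is_routing_node_in_path : Prop := ∀ (path_nodes : List Int) (routing_nodes_list : List Int), Dom_is_routing_node_in_path path_nodes routing_nodes_list → Spec_is_routing_node_in_path path_nodes routing_nodes_list (is_routing_node_in_path path_nodes routing_nodes_list)

-- ===== LEMMAS AND PROOFS =====
theorem pvGoA_eq (p : List Int) (r : List Int) : ∀ (i : Nat),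
    pvGoA p (i : Int) r =
      (match pvCollect p r with
       | none => false
       | some idxs => pvAllLt (i :: idxs) idxs) := by
  induction r with
  | nil => intro i; simp [pvGoA, pvCollect, pvAllLt]
  | cons n rest ih =>
    intro i
    simp only [pvGoA, pvCollect]
    cases hj : PySem.List.index? p n with
    | none => rfl
    | some j =>
      cases hc : pvCollect p rest with
      | none =>
        simp only [Option.map_none]
        split_ifs with h
        · have := ih j
          rw [hc] at this
          simpa using this
        · rfl
      | some idxs =>
        simp only [Option.map_some]
        by_cases h : (j : Int) > (i : Int)
        · simp only [if_pos h]
          have := ih j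
          rw [hc] at this
          simp only [this, pvAllLt]
          have : i < j := by exact_mod_cast h
          simp [this]
        · have : ¬ i < j := by omega
          simp [pvAllLt, this]

-- ===== VERDICT =====
theorem is_routing_node_in_path_spec : Claim_equal_is_routing_node_in_path := by
  intro p r _
  unfold Spec_is_routing_node_in_path is_routing_node_in_path is_routing_node_in_path_alt
  have := pvGoA_eq p r 0
  simpa using this
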